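-- pv_equiv track=rewrite | github.com/pvcraven/2048 | grid_functions.py | compress_left
-- ===== SOURCE A (Python) =====
-- from typing import List
--
-- def compress_left(grid: List) -> bool:
--     changed = False
--     for row_no in range(len(grid)):
--         cur_col = 0
--         for i in range(len(grid)):
--             if grid[row_no][cur_col] != 0:
--                 # No zero, look further left
--                 cur_col += 1
--             else:
--                 # Found a zero, shift cells to the right
--                 c = cur_col
--                 while c < len(grid) - 1:
--                     grid[row_no][c] = grid[row_no][c + 1]
--                     if grid[row_no][c]:
--                         changed = True
--                     c += 1
--                 grid[row_no][-1] = 0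
--     return changed
-- ===== SOURCE B (Python) =====
-- # Return-value re-implementation: A mutates grid in place; B only reports whether
-- # compressing each row's first len(grid) cells leftward would change anything.
-- def compress_left(grid):
--     n = len(grid)
--     for row in grid:
--         seen_zero = False
--         for x in row[:n]:
--             if x == 0:
--                 seen_zero = True
--             elif seen_zero:
--                 return True
--     return False
-- ===== Notes on version B (the rewrite author's own statement) =====
-- stated objective: simpler
-- what changed: Replaced A's in-place triple loop (for each row, n passes that shift cells left one by one while flagging copied nonzeros) with a single non-mutating scan per row that returns True as soon as a zero precedes a nonzero in the row's first n cells; Pre_ excludes only grids with a row shorter than the grid, where A raises IndexError.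
import Mathlib
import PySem

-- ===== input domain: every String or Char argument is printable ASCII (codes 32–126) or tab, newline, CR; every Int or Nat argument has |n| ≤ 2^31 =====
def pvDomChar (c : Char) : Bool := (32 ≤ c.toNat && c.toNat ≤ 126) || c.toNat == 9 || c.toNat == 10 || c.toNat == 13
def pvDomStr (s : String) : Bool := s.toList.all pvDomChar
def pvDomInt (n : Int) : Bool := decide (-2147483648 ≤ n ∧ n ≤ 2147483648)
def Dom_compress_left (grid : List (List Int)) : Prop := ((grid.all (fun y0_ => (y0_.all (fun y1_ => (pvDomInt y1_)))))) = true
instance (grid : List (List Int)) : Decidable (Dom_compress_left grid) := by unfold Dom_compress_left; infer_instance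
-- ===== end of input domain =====

-- B is a one-pass per-row scan (no mutation) reporting whether leftward compression would move
-- any nonzero; A mutates grid in place, so the equivalence proved here is about the RETURN value only.

-- ===== PORT A =====
-- the 'while c < len(grid) - 1' shift loop; reads grid[row_no][c+1] (in range under Pre_)
def shiftA (n : Nat) (l : List Int) (ch : Bool) (c : Nat) : List Int × Bool :=
  if h : c < n - 1 then
    shiftA n (l.set c (l.getD (c + 1) 0))
      (if l.getD (c + 1) 0 ≠ 0 then true else ch) (c + 1)
  else (l, ch)
termination_by n - 1 - c

-- the 'for i in range(len(grid))' loop over one row: fuel = remaining iterations,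
-- state = (current row contents, cur_col, changed); grid[row_no][-1] = 0 is set (length-1) 0
-- (exact for the nonempty rows Pre_ admits)
def innerA (n : Nat) : Nat → List Int → Nat → Bool → Bool
  | 0, _, _, ch => ch
  | Nat.succ fuel, l, cur, ch =>
    if l.getD cur 0 ≠ 0 then
      innerA n fuel l (cur + 1) ch
    else
      innerA n fuel ((shiftA n l ch cur).1.set ((shiftA n l ch cur).1.length - 1) 0)
        cur (shiftA n l ch cur).2

def compress_left (grid : List (List Int)) : Bool :=
  grid.foldl (fun ch row => innerA grid.length grid.length row 0 ch) false

-- ===== PORT B =====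
-- the inner 'for x in row[:n]' loop of B with its early 'return True'
def scanB : List Int → Bool → Bool
  | [], _ => false
  | x :: xs, seen =>
    if x = 0 then scanB xs true
    else if seen then true
    else scanB xs seen

def compress_left_alt (grid : List (List Int)) : Bool :=
  grid.any fun row => scanB (row.take grid.length) false

-- ===== PRECONDITION & SPEC =====
-- Pre_ is exactly A's return domain: A indexes every row at columns 0..len(grid)-1 (and at -1),
-- so it raises IndexError iff some row is shorter than the grid; nothing A returns on is excluded.
def Pre_compress_left (grid : List (List Int)) : Prop :=
  ∀ row ∈ grid, grid.length ≤ row.length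
instance (grid : List (List Int)) : Decidable (Pre_compress_left grid) := by
  unfold Pre_compress_left; infer_instance
def pvWitness_compress_left : List (List Int) := [[2, 0], [0, 4]]

def Spec_compress_left (grid : List (List Int)) (out : Bool) : Prop := out = compress_left_alt grid
instance (grid : List (List Int)) (out : Bool) : Decidable (Spec_compress_left grid out) := by unfold Spec_compress_left; infer_instance

-- ===== CLAIM (what is proved, stated in full; the proofs are below) =====
def Claim_equal_compress_left : Prop := ∀ (grid : List (List Int)), Dom_compress_left grid → Pre_compress_left grid → Spec_compress_left grid (compress_left grid)

-- ===== LEMMAS AND PROOFS =====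

-- "some window cell after a zero cell is nonzero": what both programs' flags mean
def ZB (l : List Int) (n : Nat) : Prop :=
  ∃ i j, i < j ∧ j < n ∧ l.getD i 0 = 0 ∧ l.getD j 0 ≠ 0

theorem set_getD_self (l : List Int) (i : Nat) (h : l.getD i 0 = v) : l.set i v = l := by
  subst h
  by_cases hi : i < l.length
  · apply List.ext_getElem (by simp)
    intro k hk hk'
    rw [List.getElem_set]
    split
    · subst k; rw [List.getD_eq_getElem _ _ hi]
    · rfl
  · exact List.set_eq_of_length_le (by omega)

theorem getD_set_ne (l : List Int) (i j : Nat) (v : Int) (h : i ≠ j) :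
    (l.set i v).getD j 0 = l.getD j 0 := by
  simp [List.getD, List.getElem?_set_ne h]

theorem shiftA_true (n : Nat) : ∀ d l ch c, n - 1 - c = d → ch = true →
    (shiftA n l ch c).2 = true := by
  intro d
  induction d with
  | zero =>
    intro l ch c hd hch
    rw [shiftA]
    split
    · omega
    · exact hch
  | succ e ih =>
    intro l ch c hd hch
    rw [shiftA]
    split
    · exact ih _ _ _ (by omega) (by simp [hch])
    · exact hch

theorem shiftA_zero (n : Nat) : ∀ d l ch c, n - 1 - c = d →
    (∀ k, c ≤ k → k < n → l.getD k 0 = 0) → shiftA n l ch c = (l, ch) := by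
  intro d
  induction d with
  | zero =>
    intro l ch c hd hz
    rw [shiftA]
    split
    · omega
    · rfl
  | succ e ih =>
    intro l ch c hd hz
    rw [shiftA]
    split
    · next hc =>
      have hv : l.getD (c + 1) 0 = 0 := hz (c + 1) (by omega) (by omega)
      rw [hv, if_neg (by simp), set_getD_self l c (hz c (le_refl c) (by omega))]
      exact ih _ _ _ (by omega) (fun k hk1 hk2 => hz k (by omega) hk2)
    · rfl

theorem shiftA_hit (n : Nat) : ∀ d l ch c j, n - 1 - c = d → c < j → j < n →
    l.getD j 0 ≠ 0 → (shiftA n l ch c).2 = true := by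
  intro d
  induction d with
  | zero =>
    intro l ch c j hd hcj hjn hnz
    omega
  | succ e ih =>
    intro l ch c j hd hcj hjn hnz
    rw [shiftA]
    split
    · next hc =>
      by_cases hv : l.getD (c + 1) 0 = 0
      · have hj2 : c + 1 < j := by
          rcases Nat.lt_or_ge (c + 1) j with h | h
          · exact h
          · exfalso; have : j = c + 1 := by omega
            rw [this] at hnz; exact hnz hv
        have hpres : (l.set c 0).getD j 0 ≠ 0 := by
          rw [getD_set_ne _ _ _ _ (by omega)]; exact hnz
        rw [hv, if_neg (by simp)]
        exact ih _ _ _ j (by omega) hj2 hjn hpres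
      · rw [if_pos hv]
        exact shiftA_true n (n - 1 - (c + 1)) _ _ _ rfl rfl
    · omega

theorem innerA_true (n : Nat) : ∀ fuel l cur, innerA n fuel l cur true = true := by
  intro fuel
  induction fuel with
  | zero => intro l cur; rfl
  | succ f ih =>
    intro l cur
    rw [innerA]
    split
    · exact ih _ _
    · rw [shiftA_true n (n - 1 - cur) l true cur rfl rfl]
      exact ih _ _

-- the quiet case: if no zero precedes a nonzero in the window, the row loop never sets changed
theorem innerA_noZB (n : Nat) : ∀ fuel l cur ch, cur + fuel ≤ n → n ≤ l.length →
    ¬ ZB l n → innerA n fuel l cur ch = ch := by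
  intro fuel
  induction fuel with
  | zero => intro l cur ch _ _ _; rfl
  | succ f ih =>
    intro l cur ch hfuel hlen hzb
    rw [innerA]
    split
    · exact ih _ _ _ (by omega) hlen hzb
    · next hcur =>
      have hcur0 : l.getD cur 0 = 0 := by
        by_contra h; exact hcur h
      have hall : ∀ k, cur ≤ k → k < n → l.getD k 0 = 0 := by
        intro k hck hkn
        rcases Nat.eq_or_lt_of_le hck with h | h
        · rw [← h]; exact hcur0
        · by_contra hk
          exact hzb ⟨cur, k, h, hkn, hcur0, hk⟩
      rw [shiftA_zero n (n - 1 - cur) _ _ _ rfl hall]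
      apply ih _ _ _ (by omega) (by simpa using hlen)
      -- the trailing set (length-1) 0 cannot create a zero-before-nonzero pair
      rintro ⟨i, j, hij, hjn, hi0, hjnz⟩
      by_cases hj : j = l.length - 1
      · rcases Nat.eq_zero_or_pos l.length with h0 | h0
        · have : l = [] := List.length_eq_zero_iff.mp h0
          subst this; simp [List.getD] at hjnz
        · have hm : l.length - 1 < l.length := by omega
          rw [hj, List.getD_eq_getElem _ _ (by simpa using hm),
            List.getElem_set_self (by simpa using hm)] at hjnz
          exact hjnz rfl
      · apply hzb
        refine ⟨i, j, hij, hjn, ?_, ?_⟩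
        · by_cases hi : i = l.length - 1
          · exfalso; omega
          · rw [getD_set_ne _ _ _ _ (fun h => hi h.symm)] at hi0; exact hi0
        · rw [getD_set_ne _ _ _ _ (fun h => hj h.symm)] at hjnz; exact hjnz

-- the loud case: reaching the first zero triggers a shift that copies a nonzero, setting changed
theorem innerA_ZB (n : Nat) (i j : Nat) (hij : i < j) (hjn : j < n) :
    ∀ fuel l cur ch, cur ≤ i → i + 1 ≤ cur + fuel →
    l.getD i 0 = 0 → l.getD j 0 ≠ 0 →
    (∀ k, cur ≤ k → k < i → l.getD k 0 ≠ 0) →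
    innerA n fuel l cur ch = true := by
  intro fuel
  induction fuel with
  | zero => intro l cur ch h1 h2 _ _ _; omega
  | succ f ih =>
    intro l cur ch h1 h2 hi0 hjnz hpre
    rw [innerA]
    split
    · next hcur =>
      have hci : cur < i := by
        rcases Nat.eq_or_lt_of_le h1 with h | h
        · exfalso; rw [h] at hcur; exact hcur hi0
        · exact h
      exact ih _ _ _ (by omega) (by omega) hi0 hjnz
        (fun k hk1 hk2 => hpre k (by omega) hk2)
    · next hcur =>
      have hcur0 : l.getD cur 0 = 0 := by by_contra h; exact hcur h
      have hci : cur = i := by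
        rcases Nat.eq_or_lt_of_le h1 with h | h
        · exact h
        · exfalso; exact hpre cur (le_refl cur) h hcur0
      rw [shiftA_hit n (n - 1 - cur) l ch cur j rfl (by omega) hjn hjnz]
      exact innerA_true n f _ cur

theorem scanB_true_any : ∀ xs : List Int, scanB xs true = xs.any (fun x => decide (x ≠ 0)) := by
  intro xs
  induction xs with
  | nil => rfl
  | cons x xs ih =>
    rw [scanB]
    by_cases hx : x = 0 <;> simp [hx, ih]

theorem scanB_false_iff : ∀ xs : List Int,
    scanB xs false = true ↔ ∃ i j, i < j ∧ j < xs.length ∧ xs.getD i 0 = 0 ∧ xs.getD j 0 ≠ 0 := by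
  intro xs
  induction xs with
  | nil => simp [scanB]
  | cons x xs ih =>
    rw [scanB]
    by_cases hx : x = 0
    · rw [if_pos hx, scanB_true_any]
      constructor
      · intro h
        rcases List.any_eq_true.mp h with ⟨a, ha, hnz⟩
        rcases List.mem_iff_getElem.mp ha with ⟨k, hk, hka⟩
        refine ⟨0, k + 1, by omega, by simp; omega, by simp [hx], ?_⟩
        rw [List.getD_cons_succ, List.getD_eq_getElem _ _ hk, hka]
        simpa using hnz
      · rintro ⟨i, j, hij, hjlen, _, hjnz⟩
        apply List.any_eq_true.mpr
        have hj : j - 1 < xs.length := by simp at hjlen; omega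
        have hjnz' : xs.getD (j - 1) 0 ≠ 0 := by
          have hje : j = (j - 1) + 1 := by omega
          rw [hje, List.getD_cons_succ] at hjnz; exact hjnz
        rw [List.getD_eq_getElem _ _ hj] at hjnz'
        exact ⟨xs[j - 1], List.getElem_mem hj, by simpa using hjnz'⟩
    · rw [if_neg hx, if_neg (by simp), ih]
      constructor
      · rintro ⟨i, j, hij, hjlen, hi0, hjnz⟩
        exact ⟨i + 1, j + 1, by omega, by simpa using hjlen, by simpa, by simpa⟩
      · rintro ⟨i, j, hij, hjlen, hi0, hjnz⟩
        rcases Nat.eq_zero_or_pos i with h0 | h0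
        · exfalso; rw [h0, List.getD_cons_zero] at hi0; exact hx hi0
        · have hj0 : 0 < j := by omega
          refine ⟨i - 1, j - 1, by omega, by simp at hjlen; omega, ?_, ?_⟩
          · have : i = (i - 1) + 1 := by omega
            rw [this, List.getD_cons_succ] at hi0; exact hi0
          · have : j = (j - 1) + 1 := by omega
            rw [this, List.getD_cons_succ] at hjnz; exact hjnz

theorem scanB_take_iff (l : List Int) (n : Nat) (hn : n ≤ l.length) :
    scanB (l.take n) false = true ↔ ZB l n := by
  rw [scanB_false_iff]
  have hlen : (l.take n).length = n := by simp [Nat.min_eq_left hn]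
  have hsame : ∀ k, k < n → (l.take n).getD k 0 = l.getD k 0 := by
    intro k hk
    rw [List.getD_eq_getElem _ _ (by omega), List.getD_eq_getElem _ _ (by omega),
      List.getElem_take]
  constructor
  · rintro ⟨i, j, hij, hjl, hi0, hjnz⟩
    rw [hlen] at hjl
    exact ⟨i, j, hij, hjl, by rw [← hsame i (by omega)]; exact hi0,
      by rw [← hsame j hjl]; exact hjnz⟩
  · rintro ⟨i, j, hij, hjn, hi0, hjnz⟩
    exact ⟨i, j, hij, by omega, by rw [hsame i (by omega)]; exact hi0,
      by rw [hsame j hjn]; exact hjnz⟩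

-- one row: A's inner loop ORs B's per-row flag onto the incoming changed flag
theorem row_eq (n : Nat) (l : List Int) (ch : Bool) (hlen : n ≤ l.length) :
    innerA n n l 0 ch = (ch || scanB (l.take n) false) := by
  by_cases hzb : ZB l n
  · rw [(scanB_take_iff l n hlen).mpr hzb, Bool.or_true]
    obtain ⟨i, j, hij, hjn, hi0, hjnz⟩ := hzb
    have hex : ∃ k, l.getD k 0 = 0 := ⟨i, hi0⟩
    classical
    let i' := Nat.find hex
    have hi'0 : l.getD i' 0 = 0 := Nat.find_spec hex
    have hi'le : i' ≤ i := Nat.find_le hi0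
    exact innerA_ZB n i' j (by omega) hjn n l 0 ch (Nat.zero_le _) (by omega) hi'0 hjnz
      (fun k _ hk => Nat.find_min hex hk)
  · rw [innerA_noZB n n l 0 ch (by omega) hlen hzb]
    have hf : scanB (l.take n) false = false :=
      Bool.eq_false_iff.mpr (fun h => hzb ((scanB_take_iff l n hlen).mp h))
    rw [hf, Bool.or_false]

theorem fold_eq (n : Nat) : ∀ (rows : List (List Int)) (ch : Bool),
    (∀ r ∈ rows, n ≤ r.length) →
    rows.foldl (fun ch row => innerA n n row 0 ch) ch
      = (ch || rows.any fun row => scanB (row.take n) false) := by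
  intro rows
  induction rows with
  | nil => intro ch _; simp
  | cons r rs ih =>
    intro ch hpre
    rw [List.foldl_cons, row_eq n r ch (hpre r List.mem_cons_self),
      ih _ (fun x hx => hpre x (List.mem_cons_of_mem r hx)), List.any_cons, Bool.or_assoc]

-- ===== VERDICT (by name: the statement is the Claim_ definition above) =====
theorem compress_left_spec : Claim_equal_compress_left := by
  intro grid _ hpre
  unfold Spec_compress_left compress_left compress_left_alt
  rw [fold_eq grid.length grid false hpre, Bool.false_or]
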